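-- pv_equiv track=rewrite | github.com/huynhtruc0309/Document-Recognition | train/core/data/triplet.py | all_triplets
-- ===== SOURCE A (Python) =====
-- def all_triplets(targets):
--     """[summary]
--
--     Args:
--         targets (List[int]): list of targets from dataset
--     """
--     anchor_positive_pairs = []
--     for idx_anchor, _ in enumerate(targets):
--         for idx_positive in range(idx_anchor + 1, len(targets)):
--             if targets[idx_anchor] == targets[idx_positive]:
--                 anchor_positive_pairs.append((idx_anchor, idx_positive))
--
--     triplets = []
--     for idx_anchor, idx_positive in anchor_positive_pairs:
--         for idx_negative, _ in enumerate(targets):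
--             if targets[idx_anchor] != targets[idx_negative]:
--                 triplets.append((idx_anchor, idx_positive, idx_negative))
--
--     return triplets
-- ===== SOURCE B (Python) =====
-- def all_triplets(targets):
--     n = len(targets)
--     # group indices by label in one pass
--     groups = {}
--     for idx, label in enumerate(targets):
--         groups.setdefault(label, []).append(idx)
--     labels = list(dict.fromkeys(targets))
--     # anchor-positive pairs: combinations within each label group,
--     # then one global sort restores A's anchor-major emission order
--     pairs = []
--     for label in labels:
--         group = groups[label]
--         for a, i in enumerate(group):
--             for j in group[a + 1:]:
--                 pairs.append((i, j))
--     pairs.sort()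
--     # negatives computed ONCE per distinct label (complement of its group)
--     negatives = {}
--     for label in labels:
--         members = set(groups[label])
--         negatives[label] = [k for k in range(n) if k not in members]
--     return [(i, j, k) for i, j in pairs for k in negatives[targets[i]]]
-- ===== Notes on version B (the rewrite author's own statement) =====
-- stated objective: faster
-- what changed: B never does A's O(n^2) pairwise scan or A's per-pair negative scan: it groups indices by label in one dict pass, generates anchor-positive pairs as within-group combinations and restores A's global anchor order with one sort, and computes each label's negative list once (set complement of its group) instead of per pair.
import Mathlib
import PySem

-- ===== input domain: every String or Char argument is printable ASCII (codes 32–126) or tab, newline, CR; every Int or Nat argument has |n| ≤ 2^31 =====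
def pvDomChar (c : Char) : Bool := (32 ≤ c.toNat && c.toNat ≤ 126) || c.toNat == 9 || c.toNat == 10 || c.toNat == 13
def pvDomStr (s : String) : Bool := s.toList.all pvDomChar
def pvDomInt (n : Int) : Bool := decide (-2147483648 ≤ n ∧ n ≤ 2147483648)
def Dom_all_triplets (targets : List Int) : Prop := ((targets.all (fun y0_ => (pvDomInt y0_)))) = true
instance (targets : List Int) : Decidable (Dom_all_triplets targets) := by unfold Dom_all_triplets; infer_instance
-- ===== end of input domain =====

-- B replaces A's quadratic pairwise anchor/positive scan and per-pair negative scan by one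
-- grouping pass, within-group pair combinations reordered by a single global sort, and one
-- negative list per distinct label.

-- ===== PORT A =====
def all_triplets (targets : List Int) : List (Int × Int × Int) :=
  let anchor_positive_pairs : List (Int × Int) :=
    (PySem.List.enumerate targets 0).foldl (fun acc p =>
      (PySem.List.pyRange (p.1 + 1) (PySem.List.len targets) 1).foldl (fun acc2 j =>
        if PySem.List.pyGetD targets p.1 0 = PySem.List.pyGetD targets j 0
        then acc2 ++ [(p.1, j)] else acc2) acc) []
  anchor_positive_pairs.foldl (fun acc pr =>
    (PySem.List.enumerate targets 0).foldl (fun acc2 q =>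
      if ¬ (PySem.List.pyGetD targets pr.1 0 = PySem.List.pyGetD targets q.1 0)
      then acc2 ++ [(pr.1, pr.2, q.1)] else acc2) acc) []

-- ===== PORT B =====
def all_triplets_alt (targets : List Int) : List (Int × Int × Int) :=
  let n : Int := PySem.List.len targets
  let groups : PySem.Dict Int (List Int) :=
    (PySem.List.enumerate targets 0).foldl
      (fun d p => d.modify p.2 [] (· ++ [p.1])) PySem.Dict.empty
  let labels : List Int := PySem.List.dedup targets
  let pairs : List (Int × Int) :=
    labels.foldl (fun acc label =>
      let group := groups.getD label []
      (PySem.List.enumerate group 0).foldl (fun acc2 p =>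
        (PySem.List.slice group (some (p.1 + 1)) none).foldl
          (fun acc3 j => acc3 ++ [(p.2, j)]) acc2) acc) []
  let pairsS : List (Int × Int) := PySem.List.sorted2 pairs (·.1) (·.2)
  let negatives : PySem.Dict Int (List Int) :=
    labels.foldl (fun d label =>
      let members := PySem.Set.ofList (groups.getD label [])
      d.insert label ((PySem.List.pyRange 0 n 1).filter
        (fun k => ! PySem.Set.contains members k))) PySem.Dict.empty
  pairsS.flatMap (fun pr =>
    (negatives.getD (PySem.List.pyGetD targets pr.1 0) []).map (fun k => (pr.1, pr.2, k)))


-- ===== PRECONDITION & SPEC =====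
def Spec_all_triplets (targets : List Int) (out : List (Int × Int × Int)) : Prop := out = all_triplets_alt targets
instance (targets : List Int) (out : List (Int × Int × Int)) : Decidable (Spec_all_triplets targets out) := by unfold Spec_all_triplets; infer_instance

-- ===== CLAIM (what is proved, stated in full; the proofs are below) =====
def Claim_equal_all_triplets : Prop := ∀ (targets : List Int), Dom_all_triplets targets → Spec_all_triplets targets (all_triplets targets)

-- ===== LEMMAS AND PROOFS =====


def pvT (targets : List Int) (i : Int) : Int := PySem.List.pyGetD targets i 0

def pvG (targets : List Int) (label : Int) : List Int :=
  (PySem.List.pyRange 0 (PySem.List.len targets) 1).filter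
    (fun i => PySem.List.pyGetD targets i 0 == label)

def pvPairsOf (g : List Int) : List (Int × Int) :=
  (PySem.List.enumerate g 0).flatMap (fun p =>
    (PySem.List.slice g (some (p.1 + 1)) none).map (fun j => (p.2, j)))

def pvPairsA (targets : List Int) : List (Int × Int) :=
  (PySem.List.pyRange 0 (PySem.List.len targets) 1).flatMap (fun i =>
    ((PySem.List.pyRange (i + 1) (PySem.List.len targets) 1).filter
      (fun j => decide (pvT targets i = pvT targets j))).map (fun j => (i, j)))

-- basic facts about the group list
theorem pvG_pairwise (targets : List Int) (label : Int) : (pvG targets label).Pairwise (· < ·) :=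
  (PySem.List.pairwise_lt_pyRange_one 0 (PySem.List.len targets)).filter _

theorem pvG_mem (targets : List Int) (label i : Int) :
    i ∈ pvG targets label ↔ 0 ≤ i ∧ i < PySem.List.len targets ∧ pvT targets i = label := by
  simp [pvG, List.mem_filter, PySem.List.mem_pyRange_one, pvT, and_assoc]

-- within a strictly increasing list, drop (k+1) elements are above g[k]
theorem pvDrop_gt (g : List Int) (hg : g.Pairwise (· < ·)) (k : Nat) (hk : k < g.length)
    (j : Int) (hj : j ∈ g.drop (k + 1)) : g[k] < j := by
  have h := (List.pairwise_iff_getElem).mp hg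
  rw [List.mem_iff_getElem] at hj
  obtain ⟨m, hm, rfl⟩ := hj
  rw [List.getElem_drop]
  exact h k (k + 1 + m) hk (by have := List.length_drop (l := g) (i := k+1) ▸ hm; omega) (by omega)

theorem pvMem_drop_of (g : List Int) (hg : g.Pairwise (· < ·)) (k m : Nat)
    (hk : k < g.length) (hm : m < g.length) (hlt : g[k] < g[m]) : g[m] ∈ g.drop (k + 1) := by
  have h := (List.pairwise_iff_getElem).mp hg
  have hkm : k < m := by
    by_contra hc
    rcases Nat.lt_or_ge m k with h1 | h1
    · exact absurd (h m k hm hk h1) (by omega)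
    · have : m = k := by omega
      subst this; omega
  rw [List.mem_iff_getElem]
  exact ⟨m - (k + 1), by rw [List.length_drop]; omega, by rw [List.getElem_drop]; congr 1; omega⟩

-- membership in the within-group pair list
theorem pvMem_pairsOf (g : List Int) (hg : g.Pairwise (· < ·)) (x : Int × Int) :
    x ∈ pvPairsOf g ↔ x.1 ∈ g ∧ x.2 ∈ g ∧ x.1 < x.2 := by
  constructor
  · intro hx
    rw [pvPairsOf, List.mem_flatMap] at hx
    obtain ⟨p, hp, hx⟩ := hx
    rw [PySem.List.mem_enumerate_iff] at hp
    obtain ⟨k, hk, rfl⟩ := hp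
    rw [List.mem_map] at hx
    obtain ⟨j, hj, rfl⟩ := hx
    have hc : ((0:Int) + k) + 1 = ((k + 1 : Nat) : Int) := by push_cast; ring
    rw [hc, PySem.List.slice_from_natCast] at hj
    exact ⟨List.getElem_mem hk, List.mem_of_mem_drop hj, pvDrop_gt g hg k hk j hj⟩
  · rintro ⟨h1, h2, h3⟩
    rw [List.mem_iff_getElem] at h1 h2
    obtain ⟨k, hk, hk'⟩ := h1
    obtain ⟨m, hm, hm'⟩ := h2
    rw [pvPairsOf, List.mem_flatMap]
    refine ⟨((0:Int) + k, g[k]), (PySem.List.mem_enumerate_iff _ _ _).mpr ⟨k, hk, rfl⟩, ?_⟩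
    rw [List.mem_map]
    have hc : ((0:Int) + k) + 1 = ((k + 1 : Nat) : Int) := by push_cast; ring
    rw [hc, PySem.List.slice_from_natCast]
    exact ⟨g[m], pvMem_drop_of g hg k m hk hm (by rw [hk', hm']; exact h3), by rw [hk', hm']⟩

-- the within-group pair list is strictly increasing in the lexicographic order
theorem pvPairsOf_pairwise (g : List Int) (hg : g.Pairwise (· < ·)) :
    (pvPairsOf g).Pairwise (fun a b => toLex a < toLex b) := by
  rw [pvPairsOf, List.pairwise_flatMap]
  constructor
  · rintro p hp
    rw [PySem.List.mem_enumerate_iff] at hp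
    obtain ⟨k, hk, rfl⟩ := hp
    rw [List.pairwise_map]
    have hc : ((0:Int) + k) + 1 = ((k + 1 : Nat) : Int) := by push_cast; ring
    rw [hc, PySem.List.slice_from_natCast]
    have hd : (g.drop (k+1)).Pairwise (· < ·) := hg.drop
    refine List.Pairwise.imp ?_ hd
    intro a b hab
    exact Prod.Lex.lt_iff.mpr (Or.inr ⟨rfl, hab⟩)
  · have hsnd : (PySem.List.enumerate g 0).Pairwise (fun p q => p.2 < q.2) := by
      rw [← List.pairwise_map (f := fun p : Int × Int => p.2)]
      rw [PySem.List.map_snd_enumerate]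
      exact hg
    refine hsnd.imp_of_mem ?_
    intro p q hp hq hpq x hx y hy
    rw [List.mem_map] at hx hy
    obtain ⟨a, _, rfl⟩ := hx
    obtain ⟨b, _, rfl⟩ := hy
    exact Prod.Lex.lt_iff.mpr (Or.inl hpq)

-- A's pair list is strictly increasing lexicographically
theorem pvPairsA_pairwise (targets : List Int) :
    (pvPairsA targets).Pairwise (fun a b => toLex a < toLex b) := by
  rw [pvPairsA, List.pairwise_flatMap]
  constructor
  · intro i _
    rw [List.pairwise_map]
    refine List.Pairwise.imp ?_ ((PySem.List.pairwise_lt_pyRange_one (i+1) (PySem.List.len targets)).filter _)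
    intro a b hab
    exact Prod.Lex.lt_iff.mpr (Or.inr ⟨rfl, hab⟩)
  · refine List.Pairwise.imp_of_mem ?_ (PySem.List.pairwise_lt_pyRange_one 0 (PySem.List.len targets))
    intro i1 i2 _ _ h12 x hx y hy
    rw [List.mem_map] at hx hy
    obtain ⟨a, _, rfl⟩ := hx
    obtain ⟨b, _, rfl⟩ := hy
    exact Prod.Lex.lt_iff.mpr (Or.inl h12)

theorem pvPairsA_mem (targets : List Int) (x : Int × Int) :
    x ∈ pvPairsA targets ↔
      0 ≤ x.1 ∧ x.1 < x.2 ∧ x.2 < PySem.List.len targets ∧ pvT targets x.1 = pvT targets x.2 := by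
  obtain ⟨i, j⟩ := x
  simp only [pvPairsA, List.mem_flatMap, List.mem_map, List.mem_filter,
    PySem.List.mem_pyRange_one, decide_eq_true_eq]
  constructor
  · rintro ⟨a, ⟨ha0, han⟩, b, ⟨⟨hb1, hb2⟩, heq⟩, h⟩
    injection h with h1 h2
    subst h1; subst h2
    exact ⟨ha0, by omega, hb2, heq⟩
  · rintro ⟨h0, hij, hjn, heq⟩
    exact ⟨i, ⟨h0, by omega⟩, j, ⟨⟨by omega, hjn⟩, heq⟩, rfl⟩

-- pvT at a valid index is an element of targets
theorem pvT_mem (targets : List Int) (i : Int) (h0 : 0 ≤ i) (h1 : i < PySem.List.len targets) :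
    pvT targets i ∈ targets := by
  rw [pvT, PySem.List.pyGetD_eq_getElem targets 0 h0 (by simpa [PySem.List.len_eq] using h1)]
  exact List.getElem_mem _

-- B's ungrouped pair list: membership
theorem pvPairsB_mem (targets : List Int) (x : Int × Int) :
    x ∈ (PySem.List.dedup targets).flatMap (fun label => pvPairsOf (pvG targets label)) ↔
      0 ≤ x.1 ∧ x.1 < x.2 ∧ x.2 < PySem.List.len targets ∧ pvT targets x.1 = pvT targets x.2 := by
  rw [List.mem_flatMap]
  constructor
  · rintro ⟨L, _, hx⟩
    rw [pvMem_pairsOf _ (pvG_pairwise targets L)] at hx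
    obtain ⟨h1, h2, h3⟩ := hx
    rw [pvG_mem] at h1 h2
    exact ⟨h1.1, h3, h2.2.1, by rw [h1.2.2, h2.2.2]⟩
  · rintro ⟨h0, hij, hjn, heq⟩
    refine ⟨pvT targets x.1, (PySem.List.mem_dedup _ _).mpr (pvT_mem targets x.1 h0 (by omega)), ?_⟩
    rw [pvMem_pairsOf _ (pvG_pairwise targets _), pvG_mem, pvG_mem]
    exact ⟨⟨h0, by omega, rfl⟩, ⟨by omega, hjn, heq.symm⟩, hij⟩

-- B's ungrouped pair list has no duplicates
theorem pvPairsB_nodup (targets : List Int) :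
    ((PySem.List.dedup targets).flatMap (fun label => pvPairsOf (pvG targets label))).Nodup := by
  rw [List.nodup_flatMap]
  constructor
  · intro L _
    refine List.Pairwise.imp ?_ (pvPairsOf_pairwise _ (pvG_pairwise targets L))
    intro a b hab
    rintro rfl
    exact lt_irrefl _ hab
  · refine List.Pairwise.imp ?_ (PySem.List.nodup_dedup targets)
    intro L1 L2 hne x hx1 hx2
    rw [pvMem_pairsOf _ (pvG_pairwise targets L1), pvG_mem] at hx1
    rw [pvMem_pairsOf _ (pvG_pairwise targets L2), pvG_mem] at hx2
    exact hne (hx1.1.2.2 ▸ hx2.1.2.2 ▸ rfl)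

-- the two pair lists are permutations of each other
theorem pvPairs_perm (targets : List Int) :
    (pvPairsA targets).Perm
      ((PySem.List.dedup targets).flatMap (fun label => pvPairsOf (pvG targets label))) := by
  have hA : (pvPairsA targets).Nodup := by
    refine List.Pairwise.imp ?_ (pvPairsA_pairwise targets)
    intro a b hab
    rintro rfl
    exact lt_irrefl _ hab
  refine (List.perm_ext_iff_of_nodup hA (pvPairsB_nodup targets)).mpr ?_
  intro x
  rw [pvPairsA_mem, pvPairsB_mem]

-- sorted2 with component keys is sorted with the lexicographic key
theorem pvSorted2_eq_sorted (xs : List (Int × Int)) :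
    PySem.List.sorted2 xs (·.1) (·.2) = PySem.List.sorted xs (fun p => toLex p) := by
  have hcmp : (fun (a b : Int × Int) =>
      decide (a.1 < b.1) || (!decide (b.1 < a.1) && decide (a.2 < b.2)))
      = (fun (a b : Int × Int) => decide ((fun p : Int × Int => toLex p) a < (fun p : Int × Int => toLex p) b)) := by
    funext a b
    rw [Bool.eq_iff_iff]
    simp only [Bool.or_eq_true, Bool.and_eq_true, Bool.not_eq_true', decide_eq_true_eq,
      decide_eq_false_iff_not, Prod.Lex.lt_iff, ofLex_toLex]
    omega
  rw [PySem.List.sorted_eq_foldl_insertBy,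
    show PySem.List.sorted2 xs (·.1) (·.2)
      = xs.foldl (fun acc x => PySem.List.insertBy (fun a b =>
          decide (a.1 < b.1) || (!decide (b.1 < a.1) && decide (a.2 < b.2))) x acc) [] from rfl,
    hcmp]

theorem pvSorted_eq' (targets : List Int) :
    PySem.List.sorted2 ((PySem.List.dedup targets).flatMap (fun label => pvPairsOf (pvG targets label))) (·.1) (·.2)
      = pvPairsA targets := by
  rw [pvSorted2_eq_sorted]
  exact PySem.List.sorted_eq_of_perm_of_pairwise_lt _ _ _ (pvPairs_perm targets) (pvPairsA_pairwise targets)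

-- the grouping dict's entry for a label is that label's index group
theorem pvGroupsD (targets : List Int) (label : Int) :
    (((PySem.List.enumerate targets 0).foldl
        (fun d p => d.modify p.2 [] (· ++ [p.1])) PySem.Dict.empty).getD label []) =
      pvG targets label := by
  have h := (List.foldl_map (f := fun p : Int × Int => (p.2, p.1))
    (g := fun (d : PySem.Dict Int (List Int)) (q : Int × Int) => d.modify q.1 [] (· ++ [q.2]))
    (l := PySem.List.enumerate targets 0) (init := PySem.Dict.empty)).symm
  rw [show (fun (d : PySem.Dict Int (List Int)) (p : Int × Int) => d.modify p.2 [] (· ++ [p.1]))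
      = (fun x y => x.modify ((fun p : Int × Int => (p.2, p.1)) y).1 []
          (· ++ [((fun p : Int × Int => (p.2, p.1)) y).2])) from rfl, h,
    PySem.Dict.getD_foldl_modify_append]
  rw [PySem.List.enumerate_eq_map_pyRange targets 0]
  simp [pvG, List.filter_map, List.map_map, Function.comp_def]

-- getD after a fold of inserts with distinct keys
theorem pvGetD_foldl_insert_not_mem (l : List Int) (f : Int → List Int)
    (d : PySem.Dict Int (List Int)) (c : Int) (h : c ∉ l) :
    (l.foldl (fun d x => d.insert x (f x)) d).getD c [] = d.getD c [] := by
  induction l generalizing d with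
  | nil => rfl
  | cons x rest ih =>
    rw [List.foldl_cons, ih (d.insert x (f x)) (fun hc => h (List.mem_cons_of_mem _ hc)),
      PySem.Dict.getD_insert_of_ne _ _ _ (fun hc => h (by rw [hc]; exact List.mem_cons_self))]

theorem pvGetD_foldl_insert_mem (l : List Int) (f : Int → List Int)
    (d : PySem.Dict Int (List Int)) (c : Int) (hnd : l.Nodup) (h : c ∈ l) :
    (l.foldl (fun d x => d.insert x (f x)) d).getD c [] = f c := by
  induction l generalizing d with
  | nil => cases h
  | cons x rest ih =>
    rw [List.foldl_cons]
    rcases List.mem_cons.mp h with rfl | hc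
    · rw [pvGetD_foldl_insert_not_mem rest f _ c (List.nodup_cons.mp hnd).1,
        PySem.Dict.getD_insert_self]
    · exact ih (d.insert x (f x)) (List.nodup_cons.mp hnd).2 hc

def pvNegD (targets : List Int) (c : Int) : List Int :=
  ((PySem.List.dedup targets).foldl (fun d label =>
      d.insert label ((PySem.List.pyRange 0 (PySem.List.len targets) 1).filter
        (fun k => ! PySem.Set.contains (PySem.Set.ofList (pvG targets label)) k)))
    PySem.Dict.empty).getD c []

theorem pvNegD_eq (targets : List Int) (i : Int) (h0 : 0 ≤ i) (h1 : i < PySem.List.len targets) :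
    pvNegD targets (pvT targets i) =
      (PySem.List.pyRange 0 (PySem.List.len targets) 1).filter
        (fun k => decide (¬ pvT targets i = pvT targets k)) := by
  rw [pvNegD, pvGetD_foldl_insert_mem _ _ _ _ (PySem.List.nodup_dedup targets)
    ((PySem.List.mem_dedup _ _).mpr (pvT_mem targets i h0 h1))]
  refine List.filter_congr ?_
  intro k hk
  rw [PySem.List.mem_pyRange_one] at hk
  rw [Bool.eq_iff_iff]
  simp only [Bool.not_eq_true', decide_eq_true_eq, decide_eq_false_iff_not,
    PySem.Set.contains, List.contains_eq_mem, decide_eq_true_eq, PySem.Set.mem_ofList, pvG_mem]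
  constructor
  · intro h he
    exact h ⟨hk.1, hk.2, he.symm⟩
  · rintro h ⟨_, _, he⟩
    exact h he.symm


theorem pvB_eq (targets : List Int) :
    all_triplets_alt targets =
      (PySem.List.sorted2 ((PySem.List.dedup targets).flatMap
          (fun label => pvPairsOf (pvG targets label))) (·.1) (·.2)).flatMap
        (fun pr => (pvNegD targets (pvT targets pr.1)).map (fun k => (pr.1, pr.2, k))) := by
  simp only [all_triplets_alt, pvGroupsD, PySem.List.foldl_append_singleton_eq_map,
    PySem.List.foldl_append_eq_flatMap, List.nil_append, pvNegD, pvPairsOf, pvT]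


theorem pvA_eq (targets : List Int) :
    all_triplets targets =
      (pvPairsA targets).flatMap (fun pr =>
        ((PySem.List.pyRange 0 (PySem.List.len targets) 1).filter
          (fun k => decide (¬ pvT targets pr.1 = pvT targets k))).map (fun k => (pr.1, pr.2, k))) := by
  simp only [all_triplets, PySem.List.foldl_append_ite, PySem.List.foldl_append_eq_flatMap,
    List.nil_append, List.flatMap_assoc, List.flatMap_map]
  rw [PySem.List.enumerate_eq_map_pyRange targets 0]
  simp only [List.flatMap_map, pvPairsA, pvT, List.flatMap_assoc, List.flatMap_map,
    List.map_map, List.filter_map, Function.comp_def]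
  rfl


-- ===== VERDICT (by name: the statement is the Claim_ definition above) =====
theorem all_triplets_spec : Claim_equal_all_triplets := by
  intro targets _
  unfold Spec_all_triplets
  rw [pvA_eq, pvB_eq, pvSorted_eq']
  refine List.flatMap_congr ?_
  intro pr hpr
  rw [pvPairsA_mem] at hpr
  rw [pvNegD_eq targets pr.1 hpr.1 (by omega)]
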